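-- pv_equiv track=rewrite | github.com/Omegalpha28/F1_Prediction | dashboard/load_to_display.py | compute_adjusted_ranks
-- ===== SOURCE A (Python) =====
-- def compute_adjusted_ranks(rank_map: dict, dnf_ids: set) -> dict:
--     adjusted = {}
--     for d_id, base_rank in rank_map.items():
--         if d_id in dnf_ids:
--             adjusted[d_id] = "❌ DNF"
--         else:
--             dnf_ahead      = sum(1 for c in dnf_ids if rank_map.get(c, 999) < base_rank)
--             adjusted[d_id] = f"P{base_rank - dnf_ahead}"
--     return adjusted
-- ===== SOURCE B (Python) =====
-- def compute_adjusted_ranks(rank_map: dict, dnf_ids: set) -> dict: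
--     # Precompute the sorted list of ranks of DNF drivers once, then count
--     # "DNFs ahead" per driver with a binary search instead of rescanning dnf_ids.
--     dnf_ranks = sorted(rank_map.get(c, 999) for c in dnf_ids)
--     adjusted = {}
--     for d_id, base_rank in rank_map.items():
--         if d_id in dnf_ids:
--             adjusted[d_id] = "❌ DNF"
--         else:
--             lo, hi = 0, len(dnf_ranks)
--             while lo < hi:
--                 mid = (lo + hi) // 2
--                 if dnf_ranks[mid] < base_rank:
--                     lo = mid + 1
--                 else:
--                     hi = mid
--             adjusted[d_id] = f"P{base_rank - lo}"
--     return adjusted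
-- ===== Notes on version B (the rewrite author's own statement) =====
-- stated objective: faster
-- what changed: B precomputes the sorted list of DNF drivers' ranks once and counts the DNFs ahead of each driver by binary search, instead of rescanning the whole DNF set for every driver.
import Mathlib
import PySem

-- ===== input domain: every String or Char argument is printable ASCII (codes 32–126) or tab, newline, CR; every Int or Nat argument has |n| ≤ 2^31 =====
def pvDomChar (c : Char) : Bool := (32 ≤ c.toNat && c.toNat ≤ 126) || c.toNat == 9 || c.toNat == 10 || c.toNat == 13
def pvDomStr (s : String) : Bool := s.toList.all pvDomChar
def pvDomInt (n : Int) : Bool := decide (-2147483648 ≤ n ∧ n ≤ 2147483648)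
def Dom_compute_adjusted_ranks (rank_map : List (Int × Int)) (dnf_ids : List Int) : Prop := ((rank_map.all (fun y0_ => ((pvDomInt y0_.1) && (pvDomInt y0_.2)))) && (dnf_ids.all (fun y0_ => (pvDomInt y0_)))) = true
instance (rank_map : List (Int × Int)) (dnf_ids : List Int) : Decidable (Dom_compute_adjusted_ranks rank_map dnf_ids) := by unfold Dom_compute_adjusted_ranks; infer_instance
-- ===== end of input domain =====

-- B precomputes the sorted list of DNF drivers' ranks once and counts DNFs ahead by binary search (faster).


-- ===== PORT A =====
def compute_adjusted_ranks (rank_map : List (Int × Int)) (dnf_ids : List Int) : List (Int × String) :=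
  (rank_map.foldl
    (fun (adjusted : PySem.Dict Int String) p =>
      if (PySem.Set.ofList dnf_ids).contains p.1 then
        adjusted.insert p.1 "❌ DNF"
      else
        let dnf_ahead : Int :=
          (PySem.Set.ofList dnf_ids).foldl
            (fun acc c => if (PySem.Dict.mk rank_map).getD c 999 < p.2 then acc + 1 else acc) 0
        adjusted.insert p.1 ("P" ++ PySem.Int.toStr (p.2 - dnf_ahead)))
    PySem.Dict.empty).items

-- ===== PORT B =====
-- hand-written bisect_left loop of Source B (lo, hi are the loop state; Python '//2' on nonnegatives = Nat '/')
def pvBisect (dr : List Int) (x : Int) (lo hi : Nat) : Nat :=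
  if _h : lo < hi then
    let mid := (lo + hi) / 2
    if dr.getD mid 0 < x then pvBisect dr x (mid + 1) hi else pvBisect dr x lo mid
  else lo
termination_by hi - lo
decreasing_by all_goals omega

def compute_adjusted_ranks_alt (rank_map : List (Int × Int)) (dnf_ids : List Int) : List (Int × String) :=
  let dnf_ranks : List Int :=
    PySem.List.sorted ((PySem.Set.ofList dnf_ids).map (fun c => (PySem.Dict.mk rank_map).getD c 999)) (fun x => x) false
  (rank_map.foldl
    (fun (adjusted : PySem.Dict Int String) p =>
      if (PySem.Set.ofList dnf_ids).contains p.1 then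
        adjusted.insert p.1 "❌ DNF"
      else
        adjusted.insert p.1 ("P" ++ PySem.Int.toStr (p.2 - (pvBisect dnf_ranks p.2 0 dnf_ranks.length : Int))))
    PySem.Dict.empty).items

-- ===== PRECONDITION & SPEC =====
def Spec_compute_adjusted_ranks (rank_map : List (Int × Int)) (dnf_ids : List Int) (out : List (Int × String)) : Prop := out = compute_adjusted_ranks_alt rank_map dnf_ids
instance (rank_map : List (Int × Int)) (dnf_ids : List Int) (out : List (Int × String)) : Decidable (Spec_compute_adjusted_ranks rank_map dnf_ids out) := by unfold Spec_compute_adjusted_ranks; infer_instance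

-- ===== CLAIM (what is proved, stated in full; the proofs are below) =====
def Claim_equal_compute_adjusted_ranks : Prop := ∀ (rank_map : List (Int × Int)) (dnf_ids : List Int), Dom_compute_adjusted_ranks rank_map dnf_ids → Spec_compute_adjusted_ranks rank_map dnf_ids (compute_adjusted_ranks rank_map dnf_ids)

-- ===== LEMMAS AND PROOFS =====

-- if everything below lo satisfies (· < x) and nothing from lo on does, countP (· < x) = lo
lemma countP_eq_of_split (ys : List Int) (x : Int) (lo : Nat) (hlo : lo ≤ ys.length)
    (h1 : ∀ i (h : i < ys.length), i < lo → ys[i] < x)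
    (h2 : ∀ i (h : i < ys.length), lo ≤ i → ¬ ys[i] < x) :
    ys.countP (fun y => decide (y < x)) = lo := by
  conv_lhs => rw [← List.take_append_drop lo ys]
  rw [List.countP_append]
  have ht : (ys.take lo).countP (fun y => decide (y < x)) = (ys.take lo).length := by
    rw [List.countP_eq_length]
    intro a ha
    rw [List.mem_iff_getElem] at ha
    obtain ⟨i, hi, rfl⟩ := ha
    have hi2 : i < lo ∧ i < ys.length := by simp [List.length_take] at hi; omega
    rw [List.getElem_take]
    simp only [decide_eq_true_eq]
    exact h1 i hi2.2 hi2.1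
  have hd : (ys.drop lo).countP (fun y => decide (y < x)) = 0 := by
    rw [List.countP_eq_zero]
    intro a ha
    rw [List.mem_iff_getElem] at ha
    obtain ⟨i, hi, rfl⟩ := ha
    have hi' : lo + i < ys.length := by simp [List.length_drop] at hi; omega
    rw [List.getElem_drop]
    simp only [decide_eq_true_eq]
    exact h2 (lo + i) hi' (Nat.le_add_right _ _)
  rw [ht, hd, List.length_take]
  omega

lemma pvBisect_inv (ys : List Int) (x : Int) (hs : ys.Pairwise (· ≤ ·)) :
    ∀ n lo hi, hi - lo = n → lo ≤ hi → hi ≤ ys.length →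
    (∀ i (h : i < ys.length), i < lo → ys[i] < x) →
    (∀ i (h : i < ys.length), hi ≤ i → ¬ ys[i] < x) →
    pvBisect ys x lo hi = ys.countP (fun y => decide (y < x)) := by
  intro n
  induction n using Nat.strong_induction_on with
  | _ n ih =>
    intro lo hi hn hle hhi h1 h2
    rw [pvBisect]
    by_cases hlh : lo < hi
    · simp only [hlh, dif_pos]
      have hmid : (lo + hi) / 2 < ys.length := by omega
      have hmlo : lo ≤ (lo + hi) / 2 := by omega
      have hmhi : (lo + hi) / 2 < hi := by omega
      rw [List.getD_eq_getElem ys 0 hmid]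
      have hpw := List.pairwise_iff_getElem.mp hs
      by_cases hc : ys[(lo + hi) / 2] < x
      · simp only [hc, if_pos]
        exact ih (hi - ((lo + hi) / 2 + 1)) (by omega) _ _ rfl (by omega) hhi
          (fun i h hilt => by
            rcases Nat.lt_or_ge i lo with hi' | hi'
            · exact h1 i h hi'
            · rcases Nat.lt_or_ge i ((lo + hi) / 2) with hlt | hge
              · exact lt_of_le_of_lt (hpw i _ h hmid hlt) hc
              · have : i = (lo + hi) / 2 := by omega
                subst this; exact hc)
          h2
      · simp only [hc, if_neg, not_false_iff]
        exact ih (((lo + hi) / 2) - lo) (by omega) _ _ rfl (by omega) (by omega) h1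
          (fun i h hge => by
            rcases Nat.lt_or_ge i ((lo + hi) / 2 + 1) with hlt | hge'
            · have : i = (lo + hi) / 2 := by omega
              subst this; exact hc
            · intro hlt'
              exact hc (lt_of_le_of_lt (hpw _ i hmid h (by omega)) hlt'))
    · simp only [hlh, dif_neg, not_false_iff]
      have hl : lo = hi := by omega
      subst hl
      exact (countP_eq_of_split ys x lo hhi h1 (fun i h hge => h2 i h hge)).symm

-- the binary search of B counts exactly the elements < x of a sorted list
lemma pvBisect_eq_countP (ys : List Int) (x : Int) (hs : ys.Pairwise (· ≤ ·)) :
    pvBisect ys x 0 ys.length = ys.countP (fun y => decide (y < x)) :=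
  pvBisect_inv ys x hs _ 0 ys.length rfl (Nat.zero_le _) le_rfl
    (fun i _ hi => absurd hi (Nat.not_lt_zero i)) (fun i h hge => absurd h (by omega))

-- per-driver agreement: A's scan over dnf_ids equals B's binary search in the sorted rank list
lemma count_eq_bisect (rank_map : List (Int × Int)) (dnf_ids : List Int) (r : Int) :
    ((PySem.Set.ofList dnf_ids).foldl
      (fun acc c => if (PySem.Dict.mk rank_map).getD c 999 < r then acc + 1 else acc) (0 : Int))
    = (pvBisect
        (PySem.List.sorted ((PySem.Set.ofList dnf_ids).map (fun c => (PySem.Dict.mk rank_map).getD c 999)) (fun x => x) false)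
        r 0
        (PySem.List.sorted ((PySem.Set.ofList dnf_ids).map (fun c => (PySem.Dict.mk rank_map).getD c 999)) (fun x => x) false).length : Int) := by
  set f : Int → Int := fun c => (PySem.Dict.mk rank_map).getD c 999 with hf
  set ms := (PySem.Set.ofList dnf_ids).map f with hms
  have hsort : (PySem.List.sorted ms (fun x => x) false).Pairwise (· ≤ ·) := by
    simpa using PySem.List.sorted_pairwise ms (fun x => x)
  rw [pvBisect_eq_countP _ r hsort]
  have hperm : (PySem.List.sorted ms (fun x => x) false).Perm ms := PySem.List.sorted_perm ms _ _
  rw [hperm.countP_eq]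
  have : ((PySem.Set.ofList dnf_ids).foldl
      (fun acc c => if f c < r then acc + 1 else acc) (0 : Int))
      = ((PySem.Set.ofList dnf_ids).foldl
      (fun acc c => if (decide (f c < r)) = true then acc + 1 else acc) (0 : Int)) := by
    simp
  rw [this, PySem.List.foldl_if_add_one (fun c => decide (f c < r)) _ 0, hms, List.countP_map]
  rw [zero_add]
  rfl

-- ===== VERDICT (by name: the statement is the Claim_ definition above) =====
theorem compute_adjusted_ranks_spec : Claim_equal_compute_adjusted_ranks := by
  intro rank_map dnf_ids _
  unfold Spec_compute_adjusted_ranks compute_adjusted_ranks compute_adjusted_ranks_alt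
  congr 1
  apply PySem.List.foldl_congr_mem
  intro acc p _
  rw [count_eq_bisect rank_map dnf_ids p.2]
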